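-- pv_equiv track=rewrite | github.com/ad-astra-per-ardua/Solving-Algorithm | acmicpc/#1086 박성원/박성원.py | count_perms
-- ===== SOURCE A (Python) =====
-- def count_perms(nums, k):
--     n = len(nums)
--     mod_values = [int(num) % k for num in nums]
--     lengths = [len(num) for num in nums]
--     dp = [[0 for _ in range(k)] for _ in range(1 << n)]
--     for i in range(n):
--         dp[1 << i][mod_values[i]] = 1
--
--     for mask in range(1 << n):
--         for mod in range(k):
--             for j in range(n):
--                 if not (mask & (1 << j)):
--                     new_mod = (mod * pow(10, lengths[j], k) + mod_values[j]) % k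
--                     dp[mask | (1 << j)][new_mod] += dp[mask][mod]
--
--     return dp[(1 << n) - 1][0]
-- ===== SOURCE B (Python) =====
-- def count_perms(nums, k):
--     n = len(nums)
--     mods = [int(s) % k for s in nums]
--     pows = [pow(10, len(s), k) for s in nums]
--     full = (1 << n) - 1
--     memo = {}
--
--     def f(mask, r):
--         if mask == full:
--             return 1 if r == 0 else 0
--         key = (mask, r)
--         if key in memo:
--             return memo[key]
--         total = 0
--         for j in range(n):
--             if not mask & (1 << j):
--                 total += f(mask | (1 << j), (r * pows[j] + mods[j]) % k)
--         memo[key] = total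
--         return total
--
--     return sum(f(1 << j, mods[j]) for j in range(n))
-- ===== Notes on version B (the rewrite author's own statement) =====
-- stated objective: alternative
-- what changed: Replaces the bottom-up push DP that iterates the whole 2^n x k table with top-down memoized recursion f(mask, r) over (used-mask, remainder) that pulls counts of completions, seeded per first fragment so n==0 still yields 0.
import Mathlib
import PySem

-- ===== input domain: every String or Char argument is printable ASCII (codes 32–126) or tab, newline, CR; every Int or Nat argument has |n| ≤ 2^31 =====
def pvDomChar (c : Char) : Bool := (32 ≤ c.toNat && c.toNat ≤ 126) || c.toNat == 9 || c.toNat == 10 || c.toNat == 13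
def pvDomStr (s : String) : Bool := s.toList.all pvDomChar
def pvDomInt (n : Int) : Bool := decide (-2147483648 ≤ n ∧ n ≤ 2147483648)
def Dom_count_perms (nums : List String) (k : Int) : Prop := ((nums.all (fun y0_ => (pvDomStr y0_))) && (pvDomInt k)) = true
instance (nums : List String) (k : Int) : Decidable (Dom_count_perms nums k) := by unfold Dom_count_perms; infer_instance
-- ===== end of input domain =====

-- B replaces A's bottom-up push DP over the full 2^n × k table by top-down memoized
-- recursion over (mask, remainder) pulling counts of completions (alternative decomposition).


-- ===== PORT A =====
-- the seeding loop: for i in range(n): dp[1 << i][mod_values[i]] = 1   (dp as a function table)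
def pvSeed (mods : List Int) (n : Nat) : Nat → Int → Int :=
  (List.range n).foldl
    (fun dp i => fun a b => if a = 1 <<< i ∧ b = mods.getD i 0 then 1 else dp a b)
    (fun _ _ => 0)

-- the triple loop: for mask in range(1<<n): for mod in range(k): for j in range(n): push
def pvPush (lens : List Nat) (mods : List Int) (k : Int) (n : Nat)
    (dp0 : Nat → Int → Int) : Nat → Int → Int :=
  (List.range (1 <<< n)).foldl
    (fun dp mask =>
      (PySem.List.pyRange 0 k 1).foldl
        (fun dp md =>
          (List.range n).foldl
            (fun dp j =>
              if mask &&& (1 <<< j) = 0 then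
                fun a b =>
                  if a = (mask ||| (1 <<< j)) ∧
                     b = PySem.Int.mod (md * PySem.Int.powMod 10 (lens.getD j 0) k + mods.getD j 0) k
                  then dp a b + dp mask md else dp a b
              else dp)
            dp)
        dp)
    dp0

def count_perms (nums : List String) (k : Int) : Int :=
  let n := nums.length
  let modValues := nums.map (fun num => PySem.Int.mod ((PySem.Int.ofStr? num).getD 0) k)
  let lengths := nums.map (fun num => (PySem.Str.len num).toNat)
  pvPush lengths modValues k n (pvSeed modValues n) ((1 <<< n) - 1) 0

-- ===== PORT B =====
def pvStep (pows mods : List Int) (k r : Int) (j : Nat) : Int :=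
  PySem.Int.mod (r * pows.getD j 0 + mods.getD j 0) k

def pvMeasure (n mask : Nat) : Nat := (1 <<< n) - 1 - (mask &&& ((1 <<< n) - 1))

theorem pv_and_two_pow_zero_testBit (x j : Nat) (h : x &&& 2 ^ j = 0) : x.testBit j = false := by
  have hat := Nat.and_two_pow x j
  rw [h] at hat
  rcases hb : x.testBit j
  · rfl
  · rw [hb] at hat; simp at hat; exact absurd hat.symm (by positivity)

theorem pv_lt_or_two_pow (x j : Nat) (h : x &&& 2 ^ j = 0) : x < x ||| 2 ^ j := by
  refine Nat.lt_of_le_of_ne Nat.left_le_or (fun he => ?_)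
  have ht := Nat.testBit_or x (2 ^ j) j
  rw [← he] at ht
  rw [pv_and_two_pow_zero_testBit x j h] at ht
  simp at ht

theorem pvMeasure_lt (n j mask : Nat) (hj : j < n) (h : mask &&& (1 <<< j) = 0) :
    pvMeasure n (mask ||| (1 <<< j)) < pvMeasure n mask := by
  unfold pvMeasure
  simp only [Nat.one_shiftLeft] at h ⊢
  have h2 : (2:Nat) ^ j < 2 ^ n := Nat.pow_lt_pow_right (by norm_num) hj
  have ha : mask &&& (2 ^ n - 1) = mask % 2 ^ n := Nat.and_two_pow_sub_one_eq_mod mask n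
  have hb : (mask ||| 2 ^ j) &&& (2 ^ n - 1) = (mask ||| 2 ^ j) % 2 ^ n :=
    Nat.and_two_pow_sub_one_eq_mod _ n
  have hsplit : (mask ||| 2 ^ j) % 2 ^ n = (mask % 2 ^ n) ||| 2 ^ j := by
    rw [← Nat.and_two_pow_sub_one_eq_mod, ← Nat.and_two_pow_sub_one_eq_mod,
      Nat.and_or_distrib_right]
    congr 1
    rw [Nat.and_two_pow_sub_one_eq_mod, Nat.mod_eq_of_lt h2]
  have hz : (mask % 2 ^ n) &&& 2 ^ j = 0 := by
    rw [← Nat.and_two_pow_sub_one_eq_mod, Nat.and_assoc, Nat.and_comm (2 ^ n - 1),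
      ← Nat.and_assoc, h, Nat.zero_and]
  have hlt : mask % 2 ^ n < (mask % 2 ^ n) ||| 2 ^ j := pv_lt_or_two_pow _ _ hz
  have hup : (mask % 2 ^ n) ||| 2 ^ j < 2 ^ n :=
    Nat.or_lt_two_pow (Nat.mod_lt _ (by positivity)) h2
  rw [ha, hb, hsplit]
  omega

-- f(mask, r) with its dict memo threaded through (the inner 'for j in range(n)' loop is pvFgo)
mutual
def pvFB (n full : Nat) (pows mods : List Int) (k : Int)
    (memo : PySem.Dict (Nat × Int) Int) (mask : Nat) (r : Int) :
    Int × PySem.Dict (Nat × Int) Int :=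
  if mask = full then ((if r = 0 then 1 else 0), memo)
  else
    match memo.get? (mask, r) with
    | some v => (v, memo)
    | none =>
      let res := pvFgo n full pows mods k mask r ((List.range n).attach) (0, memo)
      (res.1, res.2.insert (mask, r) res.1)
  termination_by (pvMeasure n mask, 1, 0)
  decreasing_by exact Prod.Lex.right _ (Prod.Lex.left _ _ (by omega))

def pvFgo (n full : Nat) (pows mods : List Int) (k : Int) (mask : Nat) (r : Int)
    (js : List {x // x ∈ List.range n}) (acc : Int × PySem.Dict (Nat × Int) Int) :
    Int × PySem.Dict (Nat × Int) Int :=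
  match js with
  | [] => acc
  | j :: rest =>
    if mask &&& (1 <<< j.1) = 0 then
      let vr := pvFB n full pows mods k acc.2 (mask ||| (1 <<< j.1)) (pvStep pows mods k r j.1)
      pvFgo n full pows mods k mask r rest (acc.1 + vr.1, vr.2)
    else pvFgo n full pows mods k mask r rest acc
  termination_by (pvMeasure n mask, 0, js.length)
  decreasing_by
    · exact Prod.Lex.left _ _ (pvMeasure_lt n j.1 mask (List.mem_range.mp j.2) (by assumption))
    · exact Prod.Lex.right _ (Prod.Lex.right _ (by simp))
    · exact Prod.Lex.right _ (Prod.Lex.right _ (by simp))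
end

def pvBsum (n full : Nat) (pows mods : List Int) (k : Int) : Int :=
  ((List.range n).foldl
    (fun (acc : Int × PySem.Dict (Nat × Int) Int) j =>
      let vr := pvFB n full pows mods k acc.2 (1 <<< j) (mods.getD j 0)
      (acc.1 + vr.1, vr.2))
    (0, PySem.Dict.empty)).1

def count_perms_alt (nums : List String) (k : Int) : Int :=
  let n := nums.length
  let mods := nums.map (fun num => PySem.Int.mod ((PySem.Int.ofStr? num).getD 0) k)
  let pows := nums.map (fun num => PySem.Int.powMod 10 (PySem.Str.len num).toNat k)
  pvBsum n ((1 <<< n) - 1) pows mods k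

-- ===== PRECONDITION & SPEC =====
-- Pre_ excludes exactly the inputs where the Python A raises: k ≤ 0 (ZeroDivisionError from
-- int(num) % k, or IndexError on the empty dp rows) and strings int() rejects (ValueError).
def Pre_count_perms (nums : List String) (k : Int) : Prop :=
  1 ≤ k ∧ ∀ s ∈ nums, (PySem.Int.ofStr? s).isSome = true
instance (nums : List String) (k : Int) : Decidable (Pre_count_perms nums k) := by
  unfold Pre_count_perms; infer_instance

def pvWitness_count_perms : List String × Int := (["521", "3", "22"], 7)

def Spec_count_perms (nums : List String) (k : Int) (out : Int) : Prop := out = count_perms_alt nums k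
instance (nums : List String) (k : Int) (out : Int) : Decidable (Spec_count_perms nums k out) := by unfold Spec_count_perms; infer_instance

-- ===== CLAIM (what is proved, stated in full; the proofs are below) =====
def Claim_equal_count_perms : Prop := ∀ (nums : List String) (k : Int), Dom_count_perms nums k → Pre_count_perms nums k → Spec_count_perms nums k (count_perms nums k)

-- ===== LEMMAS AND PROOFS =====

-- the pure value of f(mask, r): same recursion, no memo
def pvF (n : Nat) (pows mods : List Int) (k : Int) (mask : Nat) (r : Int) : Int :=
  if mask = (1 <<< n) - 1 then (if r = 0 then 1 else 0)
  else ((List.range n).attach.map (fun j =>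
      if mask &&& (1 <<< j.1) = 0 then
        pvF n pows mods k (mask ||| (1 <<< j.1)) (pvStep pows mods k r j.1)
      else 0)).sum
  termination_by pvMeasure n mask
  decreasing_by exact pvMeasure_lt n j.1 mask (List.mem_range.mp j.2) (by assumption)

def pvGood (n : Nat) (pows mods : List Int) (k : Int)
    (memo : PySem.Dict (Nat × Int) Int) : Prop :=
  ∀ p v, memo.get? p = some v → v = pvF n pows mods k p.1 p.2

def pvBans (n : Nat) (pows mods : List Int) (k : Int) : Int :=
  ((List.range n).map (fun j => pvF n pows mods k (1 <<< j) (mods.getD j 0))).sum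

def pvPhi (n : Nat) (pows mods : List Int) (k : Int) (M : Nat) (T : Nat → Int → Int) : Int :=
  ∑ mask ∈ Finset.Ico (min M ((1 <<< n) - 1)) (1 <<< n),
    ∑ t ∈ Finset.range k.toNat, T mask (t : Int) * pvF n pows mods k mask (t : Int)

theorem pv_attach_sum (n : Nat) (g : Nat → Int) :
    ((List.range n).attach.map (fun j => g j.1)).sum = ∑ j ∈ Finset.range n, g j := by
  rw [show ((List.range n).attach.map (fun j => g j.1)) = (List.range n).map g from
    List.attach_map_val]
  rfl

theorem pvF_full (n : Nat) (pows mods : List Int) (k r : Int) :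
    pvF n pows mods k ((1 <<< n) - 1) r = if r = 0 then 1 else 0 := by
  rw [pvF.eq_def]; simp

theorem pvF_rec (n : Nat) (pows mods : List Int) (k : Int) (mask : Nat) (r : Int)
    (h : mask ≠ (1 <<< n) - 1) :
    pvF n pows mods k mask r =
      ∑ j ∈ Finset.range n,
        if mask &&& (1 <<< j) = 0 then
          pvF n pows mods k (mask ||| (1 <<< j)) (pvStep pows mods k r j)
        else 0 := by
  rw [pvF.eq_def, if_neg h]
  exact pv_attach_sum n (fun j => if mask &&& (1 <<< j) = 0 then
    pvF n pows mods k (mask ||| (1 <<< j)) (pvStep pows mods k r j) else 0)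

theorem pvFgo_ok (n : Nat) (pows mods : List Int) (k : Int) (mask : Nat) (r : Int)
    (hrec : ∀ (j : Nat), j < n → mask &&& (1 <<< j) = 0 →
      ∀ (r' : Int) (memo' : PySem.Dict (Nat × Int) Int), pvGood n pows mods k memo' →
      (pvFB n ((1 <<< n) - 1) pows mods k memo' (mask ||| (1 <<< j)) r').1 =
        pvF n pows mods k (mask ||| (1 <<< j)) r' ∧
      pvGood n pows mods k (pvFB n ((1 <<< n) - 1) pows mods k memo' (mask ||| (1 <<< j)) r').2) :
    ∀ (js : List {x // x ∈ List.range n}) (acc : Int × PySem.Dict (Nat × Int) Int),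
      pvGood n pows mods k acc.2 →
      (pvFgo n ((1 <<< n) - 1) pows mods k mask r js acc).1 =
        acc.1 + (js.map (fun j => if mask &&& (1 <<< j.1) = 0 then
          pvF n pows mods k (mask ||| (1 <<< j.1)) (pvStep pows mods k r j.1) else 0)).sum ∧
      pvGood n pows mods k (pvFgo n ((1 <<< n) - 1) pows mods k mask r js acc).2 := by
  intro js
  induction js with
  | nil => intro acc hg; rw [pvFgo]; exact ⟨by simp, hg⟩
  | cons j rest ih =>
    intro acc hg
    rw [pvFgo]
    by_cases hc : mask &&& (1 <<< j.1) = 0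
    · simp only [if_pos hc]
      obtain ⟨h1, h2⟩ := hrec j.1 (List.mem_range.mp j.2) hc (pvStep pows mods k r j.1) acc.2 hg
      obtain ⟨g1, g2⟩ := ih (acc.1 +
        (pvFB n ((1 <<< n) - 1) pows mods k acc.2 (mask ||| (1 <<< j.1))
          (pvStep pows mods k r j.1)).1,
        (pvFB n ((1 <<< n) - 1) pows mods k acc.2 (mask ||| (1 <<< j.1))
          (pvStep pows mods k r j.1)).2) h2
      refine ⟨?_, g2⟩
      rw [g1]
      simp only [List.map_cons, List.sum_cons, if_pos hc, h1]
      ring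
    · simp only [if_neg hc]
      obtain ⟨g1, g2⟩ := ih acc hg
      refine ⟨?_, g2⟩
      rw [g1]
      simp [hc]

theorem pvFB_ok (n : Nat) (pows mods : List Int) (k : Int) :
    ∀ (mask : Nat) (r : Int) (memo : PySem.Dict (Nat × Int) Int),
      pvGood n pows mods k memo →
      (pvFB n ((1 <<< n) - 1) pows mods k memo mask r).1 = pvF n pows mods k mask r ∧
      pvGood n pows mods k (pvFB n ((1 <<< n) - 1) pows mods k memo mask r).2 := by
  suffices H : ∀ (μ : Nat) (mask : Nat), pvMeasure n mask = μ →
      ∀ (r : Int) (memo : PySem.Dict (Nat × Int) Int), pvGood n pows mods k memo →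
      (pvFB n ((1 <<< n) - 1) pows mods k memo mask r).1 = pvF n pows mods k mask r ∧
      pvGood n pows mods k (pvFB n ((1 <<< n) - 1) pows mods k memo mask r).2 by
    exact fun mask r memo hg => H _ mask rfl r memo hg
  intro μ
  induction μ using Nat.strong_induction_on with
  | _ μ IH =>
    intro mask hμ r memo hg
    rw [pvFB.eq_def]
    by_cases hfull : mask = (1 <<< n) - 1
    · subst hfull
      refine ⟨by simp [pvF_full], by simp [hg]⟩
    · simp only [if_neg hfull]
      cases hget : memo.get? (mask, r) with
      | some v =>
        simp only []
        exact ⟨hg (mask, r) v hget, hg⟩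
      | none =>
        simp only []
        have hrec : ∀ (j : Nat), j < n → mask &&& (1 <<< j) = 0 →
            ∀ (r' : Int) (memo' : PySem.Dict (Nat × Int) Int), pvGood n pows mods k memo' →
            (pvFB n ((1 <<< n) - 1) pows mods k memo' (mask ||| (1 <<< j)) r').1 =
              pvF n pows mods k (mask ||| (1 <<< j)) r' ∧
            pvGood n pows mods k
              (pvFB n ((1 <<< n) - 1) pows mods k memo' (mask ||| (1 <<< j)) r').2 :=
          fun j hj hc r' memo' hg' =>
            IH (pvMeasure n (mask ||| (1 <<< j))) (hμ ▸ pvMeasure_lt n j mask hj hc)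
              _ rfl r' memo' hg'
        obtain ⟨g1, g2⟩ := pvFgo_ok n pows mods k mask r hrec ((List.range n).attach) (0, memo) hg
        have hres : (pvFgo n ((1 <<< n) - 1) pows mods k mask r ((List.range n).attach) (0, memo)).1 =
            pvF n pows mods k mask r := by
          rw [g1, zero_add]
          conv_rhs => rw [pvF.eq_def, if_neg hfull]
        refine ⟨hres, ?_⟩
        intro p v hpv
        rw [PySem.Dict.get?_insert] at hpv
        by_cases hp : p = (mask, r)
        · rw [if_pos hp] at hpv
          cases hpv
          rw [hres, hp]
        · rw [if_neg hp] at hpv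
          exact g2 p v hpv

theorem pvBsum_go (n : Nat) (pows mods : List Int) (k : Int) :
    ∀ (js : List Nat) (acc : Int × PySem.Dict (Nat × Int) Int),
      pvGood n pows mods k acc.2 →
      (js.foldl (fun (acc : Int × PySem.Dict (Nat × Int) Int) j =>
          let vr := pvFB n ((1 <<< n) - 1) pows mods k acc.2 (1 <<< j) (mods.getD j 0)
          (acc.1 + vr.1, vr.2)) acc).1 =
        acc.1 + (js.map (fun j => pvF n pows mods k (1 <<< j) (mods.getD j 0))).sum := by
  intro js
  induction js with
  | nil => intro acc hg; simp
  | cons j rest ih =>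
    intro acc hg
    obtain ⟨h1, h2⟩ := pvFB_ok n pows mods k (1 <<< j) (mods.getD j 0) acc.2 hg
    simp only [List.foldl_cons, List.map_cons, List.sum_cons]
    rw [ih (acc.1 + (pvFB n ((1 <<< n) - 1) pows mods k acc.2 (1 <<< j) (mods.getD j 0)).1,
      (pvFB n ((1 <<< n) - 1) pows mods k acc.2 (1 <<< j) (mods.getD j 0)).2) h2]
    simp only [h1]
    ring

theorem pvBsum_ok (n : Nat) (pows mods : List Int) (k : Int) :
    pvBsum n ((1 <<< n) - 1) pows mods k = pvBans n pows mods k := by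
  unfold pvBsum pvBans
  rw [pvBsum_go n pows mods k (List.range n) (0, PySem.Dict.empty) (fun p v h => by
    simp [PySem.Dict.empty, PySem.Dict.get?] at h)]
  simp

theorem pv_shiftLeft_inj (i i' : Nat) (h : (1 : Nat) <<< i = 1 <<< i') : i = i' := by
  simp only [Nat.one_shiftLeft] at h
  exact Nat.pow_right_injective (le_refl 2) h

theorem pvSeed_closed (mods : List Int) (n : Nat) (a : Nat) (b : Int) :
    pvSeed mods n a b =
      ∑ i ∈ Finset.range n, (if a = 1 <<< i ∧ b = mods.getD i 0 then (1 : Int) else 0) := by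
  induction n with
  | zero => simp [pvSeed]
  | succ m ih =>
    unfold pvSeed at ih ⊢
    rw [List.range_succ, List.foldl_append, List.foldl_cons, List.foldl_nil,
      Finset.sum_range_succ]
    by_cases hc : a = 1 <<< m ∧ b = mods.getD m 0
    · simp only [if_pos hc]
      have hz : ∀ i ∈ Finset.range m,
          (if a = 1 <<< i ∧ b = mods.getD i 0 then (1 : Int) else 0) = 0 := by
        intro i hi
        rw [if_neg]
        rintro ⟨h1, _⟩
        have : i = m := pv_shiftLeft_inj i m (by rw [← h1, hc.1])
        exact absurd this (by have := Finset.mem_range.mp hi; omega)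
      rw [Finset.sum_congr rfl hz, Finset.sum_const_zero]
      norm_num
    · simp only [if_neg hc]
      rw [ih]
      simp

theorem pv_sum2_collapse (S : Finset Nat) (k' : Nat) (w : Nat) (v : Int)
    (g : Nat → Int → Int) (hw : w ∈ S) (hv0 : 0 ≤ v) (hvk : v < (k' : Int)) :
    (∑ mask ∈ S, ∑ t ∈ Finset.range k',
      if mask = w ∧ (t : Int) = v then g mask (t : Int) else 0) = g w v := by
  rw [Finset.sum_eq_single_of_mem w hw (fun mask _ hne => by
    apply Finset.sum_eq_zero
    intro t _
    rw [if_neg]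
    rintro ⟨h1, _⟩
    exact hne h1)]
  have hvmem : v.toNat ∈ Finset.range k' := by
    rw [Finset.mem_range]
    omega
  rw [Finset.sum_eq_single_of_mem v.toNat hvmem (fun t _ hne => by
    rw [if_neg]
    rintro ⟨_, h2⟩
    exact hne (by omega))]
  rw [if_pos ⟨rfl, by omega⟩]
  congr 1
  omega

theorem pvPhi_init (n : Nat) (pows mods : List Int) (k : Int) (hk : 1 ≤ k)
    (hm : ∀ i, i < n → 0 ≤ mods.getD i 0 ∧ mods.getD i 0 < k) :
    pvPhi n pows mods k 0 (pvSeed mods n) = pvBans n pows mods k := by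
  unfold pvPhi pvBans
  rw [Nat.zero_min]
  have hrw : ∀ mask ∈ Finset.Ico 0 (1 <<< n), ∀ t ∈ Finset.range k.toNat,
      pvSeed mods n mask (t : Int) * pvF n pows mods k mask (t : Int) =
      ∑ i ∈ Finset.range n, (if mask = 1 <<< i ∧ (t : Int) = mods.getD i 0 then
        pvF n pows mods k mask (t : Int) else 0) := by
    intro mask _ t _
    rw [pvSeed_closed, Finset.sum_mul]
    apply Finset.sum_congr rfl
    intro i _
    rw [ite_mul, one_mul, zero_mul]
  calc (∑ mask ∈ Finset.Ico 0 (1 <<< n), ∑ t ∈ Finset.range k.toNat,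
        pvSeed mods n mask (t : Int) * pvF n pows mods k mask (t : Int))
      = ∑ mask ∈ Finset.Ico 0 (1 <<< n), ∑ t ∈ Finset.range k.toNat,
        ∑ i ∈ Finset.range n, (if mask = 1 <<< i ∧ (t : Int) = mods.getD i 0 then
          pvF n pows mods k mask (t : Int) else 0) := by
        apply Finset.sum_congr rfl
        intro mask hmask
        apply Finset.sum_congr rfl
        intro t ht
        exact hrw mask hmask t ht
    _ = ∑ mask ∈ Finset.Ico 0 (1 <<< n), ∑ i ∈ Finset.range n, ∑ t ∈ Finset.range k.toNat,
        (if mask = 1 <<< i ∧ (t : Int) = mods.getD i 0 then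
          pvF n pows mods k mask (t : Int) else 0) := by
        apply Finset.sum_congr rfl
        intro mask _
        rw [Finset.sum_comm]
    _ = ∑ i ∈ Finset.range n, ∑ mask ∈ Finset.Ico 0 (1 <<< n), ∑ t ∈ Finset.range k.toNat,
        (if mask = 1 <<< i ∧ (t : Int) = mods.getD i 0 then
          pvF n pows mods k mask (t : Int) else 0) := Finset.sum_comm
    _ = ∑ i ∈ Finset.range n, pvF n pows mods k (1 <<< i) (mods.getD i 0) := by
        apply Finset.sum_congr rfl
        intro i hi
        have hi' := Finset.mem_range.mp hi
        refine pv_sum2_collapse (Finset.Ico 0 (1 <<< n)) k.toNat (1 <<< i)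
          (mods.getD i 0) (pvF n pows mods k) ?_ (hm i hi').1
          (by have h2 := (hm i hi').2
              have h3 : k = (k.toNat : Int) := by omega
              rw [← h3]; exact h2)
        rw [Finset.mem_Ico]
        refine ⟨Nat.zero_le _, ?_⟩
        simp only [Nat.one_shiftLeft]
        exact Nat.pow_lt_pow_right (by norm_num) hi'
    _ = ((List.range n).map (fun j => pvF n pows mods k (1 <<< j) (mods.getD j 0))).sum := rfl

theorem pvPhi_final (n : Nat) (pows mods : List Int) (k : Int) (hk : 1 ≤ k)
    (T : Nat → Int → Int) :
    pvPhi n pows mods k (1 <<< n) T = T ((1 <<< n) - 1) 0 := by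
  unfold pvPhi
  have hpos : 0 < 1 <<< n := by simp [Nat.one_shiftLeft]
  rw [Nat.min_eq_right (Nat.sub_le _ _), Nat.Ico_pred_singleton hpos, Finset.sum_singleton]
  have h0mem : 0 ∈ Finset.range k.toNat := by rw [Finset.mem_range]; omega
  rw [Finset.sum_eq_single_of_mem 0 h0mem (fun t _ hne => by
    rw [pvF_full, if_neg (show ¬((t : Int) = 0) by exact_mod_cast hne)]
    ring)]
  rw [pvF_full]
  norm_num

theorem pv_or_ne (mask j : Nat) (hc : mask &&& (1 <<< j) = 0) :
    mask ≠ mask ||| (1 <<< j) := by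
  have := pv_lt_or_two_pow mask j (by simpa [Nat.one_shiftLeft] using hc)
  simp only [Nat.one_shiftLeft] at *
  omega

theorem pv_listsum_range (k' : Nat) (g : Nat → Int) :
    ((List.range k').map g).sum = ∑ t ∈ Finset.range k', g t := rfl

theorem pv_foldJ (mask : Nat) (NB : Int → Nat → Int) (md : Int) :
    ∀ (js : List Nat) (dp : Nat → Int → Int) (a : Nat) (b : Int),
      (js.foldl (fun dp j =>
        if mask &&& (1 <<< j) = 0 then
          (fun a b => if a = (mask ||| (1 <<< j)) ∧ b = NB md j then dp a b + dp mask md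
            else dp a b)
        else dp) dp) a b
      = dp a b + (js.map (fun j =>
          if mask &&& (1 <<< j) = 0 ∧ a = (mask ||| (1 <<< j)) ∧ b = NB md j then dp mask md
          else 0)).sum := by
  intro js
  induction js with
  | nil => intro dp a b; simp
  | cons j rest ih =>
    intro dp a b
    simp only [List.foldl_cons, List.map_cons, List.sum_cons]
    by_cases hc : mask &&& (1 <<< j) = 0
    · rw [if_pos hc, ih]
      rw [show (if mask = mask ||| (1 <<< j) ∧ md = NB md j then dp mask md + dp mask md
          else dp mask md) = dp mask md from if_neg (fun h => pv_or_ne mask j hc h.1)]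
      by_cases h2 : a = (mask ||| (1 <<< j)) ∧ b = NB md j
      · rw [if_pos h2, if_pos ⟨hc, h2.1, h2.2⟩]
        ring
      · rw [if_neg h2, if_neg (fun h => h2 ⟨h.2.1, h.2.2⟩)]
        ring
    · rw [if_neg hc, ih, if_neg (fun h => hc h.1), zero_add]

theorem pv_foldMd (mask : Nat) (NB : Int → Nat → Int) (n : Nat) :
    ∀ (mds : List Int) (dp : Nat → Int → Int) (a : Nat) (b : Int),
      (mds.foldl (fun dp md => (List.range n).foldl (fun dp j =>
        if mask &&& (1 <<< j) = 0 then
          (fun a b => if a = (mask ||| (1 <<< j)) ∧ b = NB md j then dp a b + dp mask md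
            else dp a b)
        else dp) dp) dp) a b
      = dp a b + (mds.map (fun md => ((List.range n).map (fun j =>
          if mask &&& (1 <<< j) = 0 ∧ a = (mask ||| (1 <<< j)) ∧ b = NB md j then dp mask md
          else 0)).sum)).sum := by
  intro mds
  induction mds with
  | nil => intro dp a b; simp
  | cons md rest ih =>
    intro dp a b
    simp only [List.foldl_cons, List.map_cons, List.sum_cons]
    rw [ih]
    have hrow : ∀ b', ((List.range n).foldl (fun dp j =>
        if mask &&& (1 <<< j) = 0 then
          (fun a b => if a = (mask ||| (1 <<< j)) ∧ b = NB md j then dp a b + dp mask md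
            else dp a b)
        else dp) dp) mask b' = dp mask b' := by
      intro b'
      rw [pv_foldJ]
      rw [List.sum_eq_zero, add_zero]
      intro x hx
      obtain ⟨j, _, hxe⟩ := List.mem_map.mp hx
      rw [← hxe, if_neg]
      rintro ⟨hcj, htgt, _⟩
      exact pv_or_ne mask j hcj htgt
    simp only [hrow]
    rw [pv_foldJ]
    ring

theorem pv_phi_core (n : Nat) (pows mods : List Int) (k : Int) (hk : 1 ≤ k)
    (M : Nat) (hM : M < 1 <<< n) (dp T' : Nat → Int → Int)
    (hclosed : ∀ (a : Nat) (b : Int),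
      T' a b = dp a b + ∑ t ∈ Finset.range k.toNat, ∑ j ∈ Finset.range n,
        (if M &&& (1 <<< j) = 0 ∧ a = (M ||| (1 <<< j)) ∧
            b = pvStep pows mods k (t : Int) j then dp M (t : Int) else 0)) :
    pvPhi n pows mods k (M + 1) T' = pvPhi n pows mods k M dp := by
  have hkpos : (0 : Int) < k := by omega
  by_cases hfull : M = (1 <<< n) - 1
  · have hid : ∀ (a : Nat) (b : Int), T' a b = dp a b := by
      intro a b
      rw [hclosed a b]
      rw [Finset.sum_eq_zero, add_zero]
      intro t _
      apply Finset.sum_eq_zero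
      intro j hj
      rw [if_neg]
      rintro ⟨hcj, -, -⟩
      rw [hfull] at hcj
      simp only [Nat.one_shiftLeft] at hcj
      have h2j : (2 ^ n - 1) &&& 2 ^ j = 2 ^ j := by
        rw [Nat.and_comm, Nat.and_two_pow_sub_one_eq_mod,
          Nat.mod_eq_of_lt (Nat.pow_lt_pow_right (by norm_num) (Finset.mem_range.mp hj))]
      rw [h2j] at hcj
      exact absurd hcj (by positivity)
    unfold pvPhi
    rw [hfull, Nat.min_self, Nat.min_eq_right (by omega)]
    apply Finset.sum_congr rfl
    intro mask _
    apply Finset.sum_congr rfl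
    intro t _
    rw [hid]
  · have hMlt : M + 1 ≤ (1 <<< n) - 1 := by omega
    unfold pvPhi
    rw [Nat.min_eq_left hMlt, Nat.min_eq_left (by omega),
      Finset.sum_eq_sum_Ico_succ_bot hM]
    have step1 : ∀ mask ∈ Finset.Ico (M + 1) (1 <<< n), ∀ t ∈ Finset.range k.toNat,
        T' mask (t : Int) * pvF n pows mods k mask (t : Int) =
        dp mask (t : Int) * pvF n pows mods k mask (t : Int) +
        ∑ s ∈ Finset.range k.toNat, ∑ j ∈ Finset.range n,
          (if M &&& (1 <<< j) = 0 ∧ mask = (M ||| (1 <<< j)) ∧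
              (t : Int) = pvStep pows mods k (s : Int) j
           then dp M (s : Int) * pvF n pows mods k mask (t : Int) else 0) := by
      intro mask _ t _
      rw [hclosed mask (t : Int), add_mul, Finset.sum_mul]
      congr 1
      apply Finset.sum_congr rfl
      intro s _
      rw [Finset.sum_mul]
      apply Finset.sum_congr rfl
      intro j _
      rw [ite_mul, zero_mul]
    rw [Finset.sum_congr rfl (fun mask hmask =>
      Finset.sum_congr rfl (fun t ht => step1 mask hmask t ht))]
    simp only [Finset.sum_add_distrib]
    rw [add_comm]
    congr 1
    -- the pushed mass: reorder and collapse
    calc (∑ mask ∈ Finset.Ico (M + 1) (1 <<< n), ∑ t ∈ Finset.range k.toNat,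
          ∑ s ∈ Finset.range k.toNat, ∑ j ∈ Finset.range n,
            (if M &&& (1 <<< j) = 0 ∧ mask = (M ||| (1 <<< j)) ∧
                (t : Int) = pvStep pows mods k (s : Int) j
             then dp M (s : Int) * pvF n pows mods k mask (t : Int) else 0))
        = ∑ mask ∈ Finset.Ico (M + 1) (1 <<< n), ∑ s ∈ Finset.range k.toNat,
          ∑ t ∈ Finset.range k.toNat, ∑ j ∈ Finset.range n, (if M &&& (1 <<< j) = 0 ∧ mask = (M ||| (1 <<< j)) ∧
                (t : Int) = pvStep pows mods k (s : Int) j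
             then dp M (s : Int) * pvF n pows mods k mask (t : Int) else 0) := by
          apply Finset.sum_congr rfl
          intro mask _
          rw [Finset.sum_comm]
      _ = ∑ s ∈ Finset.range k.toNat, ∑ mask ∈ Finset.Ico (M + 1) (1 <<< n),
          ∑ t ∈ Finset.range k.toNat, ∑ j ∈ Finset.range n, (if M &&& (1 <<< j) = 0 ∧ mask = (M ||| (1 <<< j)) ∧
                (t : Int) = pvStep pows mods k (s : Int) j
             then dp M (s : Int) * pvF n pows mods k mask (t : Int) else 0) :=
          Finset.sum_comm
      _ = ∑ s ∈ Finset.range k.toNat, ∑ mask ∈ Finset.Ico (M + 1) (1 <<< n),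
          ∑ j ∈ Finset.range n, ∑ t ∈ Finset.range k.toNat, (if M &&& (1 <<< j) = 0 ∧ mask = (M ||| (1 <<< j)) ∧
                (t : Int) = pvStep pows mods k (s : Int) j
             then dp M (s : Int) * pvF n pows mods k mask (t : Int) else 0) := by
          apply Finset.sum_congr rfl
          intro s _
          apply Finset.sum_congr rfl
          intro mask _
          rw [Finset.sum_comm]
      _ = ∑ s ∈ Finset.range k.toNat, ∑ j ∈ Finset.range n,
          ∑ mask ∈ Finset.Ico (M + 1) (1 <<< n), ∑ t ∈ Finset.range k.toNat,
            (if M &&& (1 <<< j) = 0 ∧ mask = (M ||| (1 <<< j)) ∧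
                (t : Int) = pvStep pows mods k (s : Int) j
             then dp M (s : Int) * pvF n pows mods k mask (t : Int) else 0) := by
          apply Finset.sum_congr rfl
          intro s _
          exact Finset.sum_comm
      _ = ∑ s ∈ Finset.range k.toNat, ∑ j ∈ Finset.range n,
          (if M &&& (1 <<< j) = 0 then
            dp M (s : Int) * pvF n pows mods k (M ||| (1 <<< j)) (pvStep pows mods k (s : Int) j)
          else 0) := by
          apply Finset.sum_congr rfl
          intro s _
          apply Finset.sum_congr rfl
          intro j hj
          have hjn := Finset.mem_range.mp hj
          by_cases hcj : M &&& (1 <<< j) = 0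
          · rw [if_pos hcj]
            have hcond : ∀ (mask : Nat) (t : Nat),
                (M &&& (1 <<< j) = 0 ∧ mask = (M ||| (1 <<< j)) ∧
                  (t : Int) = pvStep pows mods k (s : Int) j)
                = (mask = (M ||| (1 <<< j)) ∧ (t : Int) = pvStep pows mods k (s : Int) j) := by
              intro mask t
              simp [hcj]
            simp only [hcond]
            refine pv_sum2_collapse (Finset.Ico (M + 1) (1 <<< n)) k.toNat (M ||| (1 <<< j))
              (pvStep pows mods k (s : Int) j)
              (fun mask t => dp M (s : Int) * pvF n pows mods k mask t) ?_ ?_ ?_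
            · rw [Finset.mem_Ico]
              constructor
              · have := pv_lt_or_two_pow M j (by simpa [Nat.one_shiftLeft] using hcj)
                simp only [Nat.one_shiftLeft]
                omega
              · simp only [Nat.one_shiftLeft] at hM ⊢
                exact Nat.or_lt_two_pow hM (Nat.pow_lt_pow_right (by norm_num) hjn)
            · exact PySem.Int.mod_nonneg _ hkpos
            · have h2 := PySem.Int.mod_lt ((s : Int) * pows.getD j 0 + mods.getD j 0) hkpos
              unfold pvStep
              omega
          · rw [if_neg hcj]
            apply Finset.sum_eq_zero
            intro mask _
            apply Finset.sum_eq_zero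
            intro t _
            rw [if_neg]
            rintro ⟨hc, -, -⟩
            exact hcj hc
      _ = ∑ s ∈ Finset.range k.toNat,
          dp M (s : Int) * pvF n pows mods k M (s : Int) := by
          apply Finset.sum_congr rfl
          intro s _
          rw [pvF_rec n pows mods k M (s : Int) hfull, Finset.mul_sum]
          apply Finset.sum_congr rfl
          intro j _
          rw [mul_ite, mul_zero]

theorem pv_phi_step (n : Nat) (lens : List Nat) (pows mods : List Int) (k : Int) (hk : 1 ≤ k)
    (hp : ∀ j, j < n → pows.getD j 0 = PySem.Int.powMod 10 (lens.getD j 0) k)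
    (M : Nat) (hM : M < 1 <<< n) (dp : Nat → Int → Int) :
    pvPhi n pows mods k (M + 1)
      ((PySem.List.pyRange 0 k 1).foldl (fun dp md => (List.range n).foldl (fun dp j =>
        if M &&& (1 <<< j) = 0 then
          (fun a b => if a = (M ||| (1 <<< j)) ∧
              b = PySem.Int.mod (md * PySem.Int.powMod 10 (lens.getD j 0) k + mods.getD j 0) k
            then dp a b + dp M md else dp a b)
        else dp) dp) dp)
      = pvPhi n pows mods k M dp := by
  -- closed form of the processed table, already in Finset shape and phrased with pvStep
  have hclosed : ∀ (a : Nat) (b : Int),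
      ((PySem.List.pyRange 0 k 1).foldl (fun dp md => (List.range n).foldl (fun dp j =>
        if M &&& (1 <<< j) = 0 then
          (fun a b => if a = (M ||| (1 <<< j)) ∧
              b = PySem.Int.mod (md * PySem.Int.powMod 10 (lens.getD j 0) k + mods.getD j 0) k
            then dp a b + dp M md else dp a b)
        else dp) dp) dp) a b
      = dp a b + ∑ t ∈ Finset.range k.toNat, ∑ j ∈ Finset.range n,
          (if M &&& (1 <<< j) = 0 ∧ a = (M ||| (1 <<< j)) ∧
              b = pvStep pows mods k (t : Int) j then dp M (t : Int) else 0) := by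
    intro a b
    rw [pv_foldMd M (fun md j =>
      PySem.Int.mod (md * PySem.Int.powMod 10 (lens.getD j 0) k + mods.getD j 0) k) n]
    congr 1
    rw [PySem.List.pyRange_one, List.map_map,
      show (k - 0).toNat = k.toNat from by omega, pv_listsum_range]
    have : ∀ t ∈ Finset.range (k - 0).toNat,
        ((List.range n).map (fun j =>
          if M &&& (1 <<< j) = 0 ∧ a = (M ||| (1 <<< j)) ∧
              b = PySem.Int.mod ((0 + (t : Int)) * PySem.Int.powMod 10 (lens.getD j 0) k + mods.getD j 0) k
            then dp M (0 + (t : Int)) else 0)).sum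
        = ∑ j ∈ Finset.range n,
          (if M &&& (1 <<< j) = 0 ∧ a = (M ||| (1 <<< j)) ∧
              b = pvStep pows mods k (t : Int) j then dp M (t : Int) else 0) := by
      intro t _
      rw [pv_listsum_range]
      apply Finset.sum_congr rfl
      intro j hj
      rw [zero_add]
      unfold pvStep
      rw [hp j (Finset.mem_range.mp hj)]
    apply Finset.sum_congr rfl
    intro t ht
    have h2 := this t (by rw [show (k - 0).toNat = k.toNat from by omega]; exact ht)
    rw [← h2]
    simp [Function.comp]
  exact pv_phi_core n pows mods k hk M hM dp _ hclosed

theorem pv_foldl_range_inv {α : Type} (N : Nat) (body : α → Nat → α) (P : Nat → α → Prop)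
    (a0 : α) (h0 : P 0 a0) (hs : ∀ M a, M < N → P M a → P (M + 1) (body a M)) :
    P N ((List.range N).foldl body a0) := by
  induction N with
  | zero => simpa
  | succ m ih =>
    rw [List.range_succ, List.foldl_append, List.foldl_cons, List.foldl_nil]
    exact hs m _ (by omega)
      (ih (fun M a hM hP => hs M a (by omega) hP))

set_option maxHeartbeats 1000000 in
theorem pvPush_ok (lens : List Nat) (mods pows : List Int) (k : Int) (n : Nat) (hk : 1 ≤ k)
    (hm : ∀ i, i < n → 0 ≤ mods.getD i 0 ∧ mods.getD i 0 < k)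
    (hp : ∀ j, j < n → pows.getD j 0 = PySem.Int.powMod 10 (lens.getD j 0) k) :
    pvPush lens mods k n (pvSeed mods n) ((1 <<< n) - 1) 0 = pvBans n pows mods k := by
  unfold pvPush
  have hinv := pv_foldl_range_inv (1 <<< n)
    (fun dp mask => (PySem.List.pyRange 0 k 1).foldl (fun dp md => (List.range n).foldl (fun dp j =>
      if mask &&& (1 <<< j) = 0 then
        (fun a b => if a = (mask ||| (1 <<< j)) ∧
            b = PySem.Int.mod (md * PySem.Int.powMod 10 (lens.getD j 0) k + mods.getD j 0) k
          then dp a b + dp mask md else dp a b)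
      else dp) dp) dp)
    (fun M dp => pvPhi n pows mods k M dp = pvBans n pows mods k)
    (pvSeed mods n)
    (pvPhi_init n pows mods k hk hm)
    (fun M dp hM hP => by
      refine Eq.trans ?_ hP
      exact pv_phi_step n lens pows mods k hk hp M hM dp)
  exact (pvPhi_final n pows mods k hk _).symm.trans hinv

-- ===== VERDICT (by name: the statement is the Claim_ definition above) =====
theorem pv_getD_map {α β : Type} (l : List α) (f : α → β) (d : β) (i : Nat)
    (h : i < l.length) : (l.map f).getD i d = f l[i] := by
  rw [List.getD_eq_getElem _ _ (by simpa using h)]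
  simp

theorem count_perms_spec : Claim_equal_count_perms := by
  intro nums k _ hpre
  unfold Spec_count_perms
  simp only [count_perms, count_perms_alt]
  have hk := hpre.1
  have hm : ∀ i, i < nums.length →
      0 ≤ (nums.map (fun num => PySem.Int.mod ((PySem.Int.ofStr? num).getD 0) k)).getD i 0 ∧
      (nums.map (fun num => PySem.Int.mod ((PySem.Int.ofStr? num).getD 0) k)).getD i 0 < k := by
    intro i hi
    rw [pv_getD_map nums _ 0 i hi]
    exact ⟨PySem.Int.mod_nonneg _ (by omega), PySem.Int.mod_lt _ (by omega)⟩
  have hp : ∀ j, j < nums.length →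
      (nums.map (fun num => PySem.Int.powMod 10 (PySem.Str.len num).toNat k)).getD j 0 =
      PySem.Int.powMod 10 ((nums.map (fun num => (PySem.Str.len num).toNat)).getD j 0) k := by
    intro j hj
    rw [pv_getD_map nums _ 0 j hj, pv_getD_map nums _ 0 j hj]
  rw [pvPush_ok (nums.map (fun num => (PySem.Str.len num).toNat))
    (nums.map (fun num => PySem.Int.mod ((PySem.Int.ofStr? num).getD 0) k))
    (nums.map (fun num => PySem.Int.powMod 10 (PySem.Str.len num).toNat k))
    k nums.length hk hm hp,
    pvBsum_ok]
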